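-- pv_equiv track=rewrite | github.com/matchRos/usb_c_insertion | usb_c_insertion/scripts/presentation_snapshot_recorder.py | _infer_camera_info_topic
-- ===== SOURCE A (Python) =====
-- def _infer_camera_info_topic(image_topic: str) -> str:
--     topic = image_topic.strip()
--     suffixes = (
--         "/image_rect_color",
--         "/image_rect",
--         "/image_raw",
--         "/image_color",
--     )
--     for suffix in suffixes:
--         if topic.endswith(suffix):
--             return topic[: -len(suffix)] + "/camera_info"
--     return ""
-- ===== SOURCE B (Python) =====
-- _IMAGE_SUFFIXES = frozenset({"image_rect_color", "image_rect", "image_raw", "image_color"})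
--
--
-- def _infer_camera_info_topic(image_topic: str) -> str:
--     topic = image_topic.strip()
--     cut = topic.rfind("/")
--     if cut != -1 and topic[cut + 1:] in _IMAGE_SUFFIXES:
--         return topic[:cut] + "/camera_info"
--     return ""
-- ===== Notes on version B (the rewrite author's own statement) =====
-- stated objective: idiomatic
-- what changed: Replaces the four-suffix endswith loop by locating the last path separator once with rfind and testing the final path segment against a frozenset, rebuilding the topic from the split point.
import Mathlib
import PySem

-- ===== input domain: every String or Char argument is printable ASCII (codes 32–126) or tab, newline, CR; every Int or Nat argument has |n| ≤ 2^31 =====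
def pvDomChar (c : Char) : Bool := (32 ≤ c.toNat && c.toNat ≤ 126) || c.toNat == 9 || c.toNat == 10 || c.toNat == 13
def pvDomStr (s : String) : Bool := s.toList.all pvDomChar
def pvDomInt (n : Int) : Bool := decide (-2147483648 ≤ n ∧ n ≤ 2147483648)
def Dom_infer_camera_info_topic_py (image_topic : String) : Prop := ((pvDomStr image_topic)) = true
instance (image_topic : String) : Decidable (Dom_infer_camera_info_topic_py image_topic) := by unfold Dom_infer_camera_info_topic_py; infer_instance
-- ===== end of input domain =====

-- B replaces A's four-suffix endswith loop by one rfind('/') locating the last path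
-- separator plus a set-membership test on the final segment (idiomatic, same cost).


-- ===== PORT A =====
-- the 'for suffix in suffixes' loop with its early return, as structural recursion
def pySuffixLoop (topic : String) : List String → String
  | [] => ""
  | suffix :: rest =>
    if PySem.Str.endswith topic suffix then
      PySem.Str.slice topic none (some (-(PySem.Str.len suffix))) ++ "/camera_info"
    else pySuffixLoop topic rest

def infer_camera_info_topic_py (image_topic : String) : String :=
  let topic := PySem.Str.strip image_topic
  pySuffixLoop topic ["/image_rect_color", "/image_rect", "/image_raw", "/image_color"]

-- ===== PORT B =====
-- the frozenset of known tails (a Python set of distinct string literals)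
def pvImageSuffixes : List String := ["image_rect_color", "image_rect", "image_raw", "image_color"]

def infer_camera_info_topic_py_alt (image_topic : String) : String :=
  let topic := PySem.Str.strip image_topic
  let cut := PySem.Str.rfind topic "/"
  if cut ≠ -1 ∧ PySem.Str.slice topic (some (cut + 1)) none ∈ pvImageSuffixes then
    PySem.Str.slice topic none (some cut) ++ "/camera_info"
  else ""

-- ===== PRECONDITION & SPEC =====
def Spec_infer_camera_info_topic_py (image_topic : String) (out : String) : Prop := out = infer_camera_info_topic_py_alt image_topic
instance (image_topic : String) (out : String) : Decidable (Spec_infer_camera_info_topic_py image_topic out) := by unfold Spec_infer_camera_info_topic_py; infer_instance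

-- ===== CLAIM (what is proved, stated in full; the proofs are below) =====
def Claim_equal_infer_camera_info_topic_py : Prop := ∀ (image_topic : String), Dom_infer_camera_info_topic_py image_topic → Spec_infer_camera_info_topic_py image_topic (infer_camera_info_topic_py image_topic)

-- ===== LEMMAS AND PROOFS =====

theorem pv_go_zero (cs sub : List Char) :
    PySem.Chars.rfind.go cs sub 0 = if sub.isPrefixOf cs then 0 else -1 := by
  rw [PySem.Chars.rfind.go.eq_def]

theorem pv_go_succ (cs sub : List Char) (j : ℕ) :
    PySem.Chars.rfind.go cs sub (j+1) =
      if sub.isPrefixOf (cs.drop (j+1)) then (((j+1 : ℕ)) : Int) else PySem.Chars.rfind.go cs sub j := by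
  rw [PySem.Chars.rfind.go.eq_def]

-- ['/'] is a prefix of cs.drop i exactly when cs[i] = '/'
theorem pv_slash_prefix_iff (cs : List Char) (i : ℕ) :
    (['/'] <+: cs.drop i) ↔ cs[i]? = some '/' := by
  constructor
  · rintro ⟨t, ht⟩
    rw [← List.head?_drop, ← ht]
    rfl
  · intro h
    rw [← List.head?_drop] at h
    rcases hd : cs.drop i with _ | ⟨c, t⟩ <;> rw [hd] at h
    · simp at h
    · simp at h
      exact ⟨t, by simp [h]⟩

-- rfind.go on the needle '/' returns -1 with no slash at indices ≤ n,
-- or the greatest index j ≤ n holding a slash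
theorem pv_go_spec (cs : List Char) (n : ℕ) :
    (PySem.Chars.rfind.go cs ['/'] n = -1 ∧ ∀ i ≤ n, cs[i]? ≠ some '/') ∨
    (∃ j : ℕ, j ≤ n ∧ PySem.Chars.rfind.go cs ['/'] n = (j : Int) ∧ cs[j]? = some '/' ∧
      ∀ i, j < i → i ≤ n → cs[i]? ≠ some '/') := by
  induction n with
  | zero =>
    have hpre : (['/'].isPrefixOf cs = true) ↔ cs[0]? = some '/' := by
      rw [List.isPrefixOf_iff_prefix]
      simpa using pv_slash_prefix_iff cs 0
    rw [pv_go_zero]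
    by_cases h : cs[0]? = some '/'
    · right
      exact ⟨0, le_refl 0, by rw [if_pos (hpre.mpr h)]; simp, h, fun i h1 h2 => by omega⟩
    · left
      exact ⟨by rw [if_neg (fun hp => h (hpre.mp hp))],
        fun i hi => by interval_cases i; exact h⟩
  | succ j ih =>
    have hpre : (['/'].isPrefixOf (cs.drop (j+1)) = true) ↔ cs[j+1]? = some '/' := by
      rw [List.isPrefixOf_iff_prefix]
      exact pv_slash_prefix_iff cs (j+1)
    rw [pv_go_succ]
    by_cases h : cs[j+1]? = some '/'
    · right
      exact ⟨j+1, le_refl _, by rw [if_pos (hpre.mpr h)], h, fun i h1 h2 => by omega⟩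
    · rw [if_neg (fun hp => h (hpre.mp hp))]
      rcases ih with ⟨h1, h2⟩ | ⟨k, hk, h1, h2, h3⟩
      · left
        refine ⟨h1, fun i hi => ?_⟩
        rcases Nat.eq_or_lt_of_le hi with he | hl
        · subst he; exact h
        · exact h2 i (by omega)
      · right
        refine ⟨k, by omega, h1, h2, fun i hki hi => ?_⟩
        rcases Nat.eq_or_lt_of_le hi with he | hl
        · subst he; exact h
        · exact h3 i hki (by omega)

-- a string ending with '/'::w has a slash
theorem pv_suffix_gives_slash (cs w : List Char) (h : ('/'::w) <:+ cs) :
    ∃ m ≤ cs.length, cs[m]? = some '/' := by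
  rcases h with ⟨u, hu⟩
  refine ⟨u.length, ?_, ?_⟩
  · rw [← hu]; simp
  · rw [← hu, List.getElem?_append_right (le_refl _)]
    simp

-- if cs ends with '/'::w and w contains no '/', the last slash of cs sits right before w
theorem pv_endswith_char (cs w : List Char) (hw : '/' ∉ w) (hsuf : ('/'::w) <:+ cs)
    (j : ℕ) (hj : cs[j]? = some '/') (hafter : ∀ i, j < i → i ≤ cs.length → cs[i]? ≠ some '/') :
    cs.drop (j+1) = w := by
  rcases hsuf with ⟨u, hu⟩
  have hju : j = u.length := by
    by_contra hne
    rcases Nat.lt_or_ge j u.length with hlt | hge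
    · have hsl : cs[u.length]? = some '/' := by
        rw [← hu, List.getElem?_append_right (le_refl _)]
        simp
      have hule : u.length ≤ cs.length := by rw [← hu]; simp
      exact hafter u.length hlt hule hsl
    · have hgt : u.length < j := lt_of_le_of_ne hge (fun h => hne h.symm)
      have hjlen : j < cs.length := (List.getElem?_eq_some_iff.mp hj).1
      have hw' : cs[j]? = w[j - (u.length + 1)]? := by
        rw [← hu, List.getElem?_append_right (by omega)]
        rw [show j - u.length = (j - u.length - 1) + 1 by omega]
        simp only [List.getElem?_cons_succ]
        rfl
      rw [hw'] at hj
      exact hw (List.mem_of_getElem? hj)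
  subst hju
  have hd : cs.drop u.length = '/'::w := by
    rw [← hu, List.drop_left]
  have := congrArg (List.drop 1) hd
  simpa [List.drop_drop, Nat.add_comm] using this

-- conversely, from the last-slash data one reconstructs the suffix
theorem pv_recover_suffix (cs : List Char) (j : ℕ) (hj : cs[j]? = some '/') :
    ('/' :: cs.drop (j+1)) <:+ cs := by
  refine ⟨cs.take j, ?_⟩
  have hjlen : j < cs.length := (List.getElem?_eq_some_iff.mp hj).1
  have hdrop : cs.drop j = '/' :: cs.drop (j+1) := by
    have h1 : cs.drop j = cs[j] :: cs.drop (j+1) := List.drop_eq_getElem_cons hjlen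
    have h2 : cs[j] = '/' := by
      have := List.getElem?_eq_getElem hjlen
      rw [this] at hj
      exact Option.some.inj hj
    rw [h1, h2]
  rw [← hdrop, List.take_append_drop]

-- when topic has no slash at all, an endswith against a '/'-headed suffix fails
theorem pv_no_slash_endswith (topic : String)
    (hno : ∀ i ≤ topic.toList.length, topic.toList[i]? ≠ some '/')
    (s : String) (w : List Char) (hs : s.toList = '/'::w) :
    PySem.Str.endswith topic s = false := by
  have hnot : ¬ ('/'::w) <:+ topic.toList := by
    intro h
    rcases pv_suffix_gives_slash _ w h with ⟨m, hm, hslash⟩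
    exact hno m hm hslash
  rw [PySem.Str.endswith_eq, hs]
  exact Bool.eq_false_iff.mpr (fun ht => hnot ((PySem.Chars.endswith_iff _ _).mp ht))

-- with a last slash at j, endswith a '/'-headed suffix whose tail differs from the
-- final segment fails
theorem pv_not_endswith (topic : String) (j : ℕ)
    (hj : topic.toList[j]? = some '/')
    (hafter : ∀ i, j < i → i ≤ topic.toList.length → topic.toList[i]? ≠ some '/')
    (s : String) (w : List Char) (hs : s.toList = '/'::w) (hw : '/' ∉ w)
    (hne : topic.toList.drop (j+1) ≠ w) :
    PySem.Str.endswith topic s = false := by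
  rw [PySem.Str.endswith_eq, hs]
  refine Bool.eq_false_iff.mpr (fun ht => ?_)
  exact hne (pv_endswith_char _ w hw ((PySem.Chars.endswith_iff _ _).mp ht) j hj hafter)

-- with a last slash at j and the final segment equal to w, endswith '/'::w succeeds
theorem pv_yes_endswith (topic : String) (j : ℕ)
    (hj : topic.toList[j]? = some '/')
    (s : String) (w : List Char) (hs : s.toList = '/'::w)
    (hseg : topic.toList.drop (j+1) = w) :
    PySem.Str.endswith topic s = true := by
  rw [PySem.Str.endswith_eq, hs]
  exact (PySem.Chars.endswith_iff _ _).mpr (hseg ▸ pv_recover_suffix _ j hj)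

-- the two cut expressions agree: A's negative-length slice is B's take-to-the-slash
theorem pv_cut_eq (topic : String) (j : ℕ)
    (hj : topic.toList[j]? = some '/')
    (s : String) (w : List Char) (hs : s.toList = '/'::w)
    (hseg : topic.toList.drop (j+1) = w) :
    PySem.Str.slice topic none (some (-(PySem.Str.len s))) =
      PySem.Str.slice topic none (some ((j : ℕ) : Int)) := by
  have hjlen : j < topic.toList.length := (List.getElem?_eq_some_iff.mp hj).1
  have hwlen : topic.toList.length - (j+1) = w.length := by
    have := congrArg List.length hseg
    simpa using this
  have hlen : topic.toList.length = j + 1 + w.length := by omega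
  have hslen : PySem.Str.len s = ((1 + w.length : ℕ) : Int) := by
    unfold PySem.Str.len
    rw [hs]
    simp [Nat.add_comm]
  rw [← String.toList_inj, PySem.Str.toList_slice, PySem.Str.toList_slice, hslen,
    PySem.Chars.slice_eq_listSlice, PySem.Chars.slice_eq_listSlice]
  rw [PySem.List.slice_to_neg_natCast _ _ (by omega), PySem.List.slice_to_natCast, hlen]
  congr 1
  omega

-- the key equivalence, for an arbitrary (already stripped) topic string
theorem pv_main (topic : String) :
    pySuffixLoop topic ["/image_rect_color", "/image_rect", "/image_raw", "/image_color"] =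
    (if PySem.Str.rfind topic "/" ≠ -1 ∧
        PySem.Str.slice topic (some (PySem.Str.rfind topic "/" + 1)) none ∈ pvImageSuffixes then
       PySem.Str.slice topic none (some (PySem.Str.rfind topic "/")) ++ "/camera_info"
     else "") := by
  have hslash : "/".toList = ['/'] := rfl
  have hrfind : PySem.Str.rfind topic "/" = PySem.Chars.rfind.go topic.toList ['/'] topic.toList.length := by
    rw [PySem.Str.rfind_eq, hslash]
    rfl
  have h1 : ("/image_rect_color" : String).toList = '/' :: ("image_rect_color" : String).toList := rfl
  have h2 : ("/image_rect" : String).toList = '/' :: ("image_rect" : String).toList := rfl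
  have h3 : ("/image_raw" : String).toList = '/' :: ("image_raw" : String).toList := rfl
  have h4 : ("/image_color" : String).toList = '/' :: ("image_color" : String).toList := rfl
  rcases pv_go_spec topic.toList topic.toList.length with ⟨hgo, hno⟩ | ⟨j, hjle, hgo, hj, hafter⟩
  · -- no slash anywhere: both sides give ""
    have hcut : PySem.Str.rfind topic "/" = -1 := by rw [hrfind, hgo]
    have hno' : ∀ i ≤ topic.toList.length, topic.toList[i]? ≠ some '/' := hno
    rw [if_neg (by rw [hcut]; simp)]
    simp only [pySuffixLoop,
      pv_no_slash_endswith topic hno' _ _ h1, pv_no_slash_endswith topic hno' _ _ h2,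
      pv_no_slash_endswith topic hno' _ _ h3, pv_no_slash_endswith topic hno' _ _ h4]
    simp
  · -- last slash at index j
    have hcut : PySem.Str.rfind topic "/" = ((j : ℕ) : Int) := by rw [hrfind, hgo]
    have hsegL : (PySem.Str.slice topic (some (PySem.Str.rfind topic "/" + 1)) none).toList
        = topic.toList.drop (j+1) := by
      rw [PySem.Str.toList_slice, PySem.Chars.slice_eq_listSlice, hcut,
        show ((j : ℕ) : Int) + 1 = (((j+1 : ℕ)) : Int) by push_cast; ring,
        PySem.List.slice_from_natCast]
    have hmem_iff : ∀ t : String,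
        (PySem.Str.slice topic (some (PySem.Str.rfind topic "/" + 1)) none = t
          ↔ topic.toList.drop (j+1) = t.toList) := by
      intro t
      rw [← String.toList_inj, hsegL]
    by_cases e1 : topic.toList.drop (j+1) = ("image_rect_color" : String).toList
    · rw [if_pos ⟨by rw [hcut]; simp, by
        unfold pvImageSuffixes; simp only [List.mem_cons]; left; exact (hmem_iff _).mpr e1⟩]
      simp only [pySuffixLoop, pv_yes_endswith topic j hj _ _ h1 e1, if_pos]
      rw [pv_cut_eq topic j hj _ _ h1 e1, hcut]
    · by_cases e2 : topic.toList.drop (j+1) = ("image_rect" : String).toList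
      · rw [if_pos ⟨by rw [hcut]; simp, by
          unfold pvImageSuffixes; simp only [List.mem_cons]; right; left; exact (hmem_iff _).mpr e2⟩]
        simp only [pySuffixLoop,
          pv_not_endswith topic j hj hafter _ _ h1 (by decide) (by rw [e2]; decide),
          pv_yes_endswith topic j hj _ _ h2 e2, if_pos, Bool.false_eq_true, if_false]
        rw [pv_cut_eq topic j hj _ _ h2 e2, hcut]
      · by_cases e3 : topic.toList.drop (j+1) = ("image_raw" : String).toList
        · rw [if_pos ⟨by rw [hcut]; simp, by
            unfold pvImageSuffixes; simp only [List.mem_cons]; right; right; left; exact (hmem_iff _).mpr e3⟩]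
          simp only [pySuffixLoop,
            pv_not_endswith topic j hj hafter _ _ h1 (by decide) (by rw [e3]; decide),
            pv_not_endswith topic j hj hafter _ _ h2 (by decide) (by rw [e3]; decide),
            pv_yes_endswith topic j hj _ _ h3 e3, if_pos, Bool.false_eq_true, if_false]
          rw [pv_cut_eq topic j hj _ _ h3 e3, hcut]
        · by_cases e4 : topic.toList.drop (j+1) = ("image_color" : String).toList
          · rw [if_pos ⟨by rw [hcut]; simp, by
              unfold pvImageSuffixes; simp only [List.mem_cons]; right; right; right; left; exact (hmem_iff _).mpr e4⟩]
            simp only [pySuffixLoop,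
              pv_not_endswith topic j hj hafter _ _ h1 (by decide) (by rw [e4]; decide),
              pv_not_endswith topic j hj hafter _ _ h2 (by decide) (by rw [e4]; decide),
              pv_not_endswith topic j hj hafter _ _ h3 (by decide) (by rw [e4]; decide),
              pv_yes_endswith topic j hj _ _ h4 e4, if_pos, Bool.false_eq_true, if_false]
            rw [pv_cut_eq topic j hj _ _ h4 e4, hcut]
          · -- final segment unknown: both sides give ""
            rw [if_neg (by
              rintro ⟨-, hmem⟩
              unfold pvImageSuffixes at hmem
              simp only [List.mem_cons, List.not_mem_nil, or_false] at hmem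
              rcases hmem with h | h | h | h
              · exact e1 ((hmem_iff _).mp h)
              · exact e2 ((hmem_iff _).mp h)
              · exact e3 ((hmem_iff _).mp h)
              · exact e4 ((hmem_iff _).mp h))]
            simp only [pySuffixLoop,
              pv_not_endswith topic j hj hafter _ _ h1 (by decide) e1,
              pv_not_endswith topic j hj hafter _ _ h2 (by decide) e2,
              pv_not_endswith topic j hj hafter _ _ h3 (by decide) e3,
              pv_not_endswith topic j hj hafter _ _ h4 (by decide) e4]
            simp

-- ===== VERDICT (by name: the statement is the Claim_ definition above) =====
theorem infer_camera_info_topic_py_spec : Claim_equal_infer_camera_info_topic_py := by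
  intro image_topic _
  unfold Spec_infer_camera_info_topic_py infer_camera_info_topic_py infer_camera_info_topic_py_alt
  exact pv_main (PySem.Str.strip image_topic)
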